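-- pv_equiv track=rewrite | github.com/aishwarya-patel23/10_days_of_code | day6.py | knightlOnAChessboard
-- ===== SOURCE A (Python) =====
-- def knightlOnAChessboard(n):
--     cost = [[-1 for _ in range(n - 1)] for _ in range(n - 1)]
--     cost[n - 2][n - 2] = 1
--     for i in range(n - 1):
--         for j in range(i, n - 1):
--             if i < n // 2 or j < n // 2:
--                 cost[i][j] = bfs(i + 1, j + 1, n)
--                 cost[j][i] = cost[i][j]
--     return cost
--
-- def bfs(a, b, n):
--     q = [(0, 0, 0)]
--     visited = [[False] * n for _ in range(n)]
--     while len(q):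
--         i, j, k = q.pop()
--         if i == n - 1 and j == n - 1:
--             return k
--         moves = [(i + a, j + b), (i + b, j + a),(i - a, j - b), (i - b, j - a),
--             (i - a, j + b), (i - b, j + a),(i + a, j - b), (i + b, j - a),]
--
--         valid_moves = [(i_, j_) for i_, j_ in moves if 0 <= i_ < n and 0 <= j_ < n]
--         for i_, j_ in valid_moves:
--             if not visited[i_][j_]:
--                 q.insert(0, (i_, j_, k + 1))
--                 visited[i_][j_] = True
--     return -1
-- ===== SOURCE B (Python) =====
-- def knightlOnAChessboard(n):
--     cost = [[-1 for _ in range(n - 1)] for _ in range(n - 1)]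
--     cost[n - 2][n - 2] = 1
--     for i in range(n - 1):
--         for j in range(i, n - 1):
--             if i < n // 2 or j < n // 2:
--                 cost[i][j] = bfs(i + 1, j + 1, n)
--                 cost[j][i] = cost[i][j]
--     return cost
--
-- def bfs(a, b, n):
--     # level-synchronized BFS: a frontier per distance instead of a queue of triples
--     visited = set()
--     frontier = [(0, 0)]
--     level = 0
--     while frontier:
--         if (n - 1, n - 1) in frontier:
--             return level
--         nxt = []
--         for i, j in frontier:
--             for t in ((i + a, j + b), (i + b, j + a), (i - a, j - b), (i - b, j - a),
--                       (i - a, j + b), (i - b, j + a), (i + a, j - b), (i + b, j - a)):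
--                 if 0 <= t[0] < n and 0 <= t[1] < n and t not in visited:
--                     visited.add(t)
--                     nxt.append(t)
--         frontier = nxt
--         level += 1
--     return -1
-- ===== Notes on version B (the rewrite author's own statement) =====
-- stated objective: alternative
-- what changed: bfs is rewritten as a level-synchronized BFS (a list frontier per distance plus a level counter) instead of A's single queue of (i,j,distance) triples with O(queue) insert(0,...) operations; the outer loop is unchanged.
import Mathlib
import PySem

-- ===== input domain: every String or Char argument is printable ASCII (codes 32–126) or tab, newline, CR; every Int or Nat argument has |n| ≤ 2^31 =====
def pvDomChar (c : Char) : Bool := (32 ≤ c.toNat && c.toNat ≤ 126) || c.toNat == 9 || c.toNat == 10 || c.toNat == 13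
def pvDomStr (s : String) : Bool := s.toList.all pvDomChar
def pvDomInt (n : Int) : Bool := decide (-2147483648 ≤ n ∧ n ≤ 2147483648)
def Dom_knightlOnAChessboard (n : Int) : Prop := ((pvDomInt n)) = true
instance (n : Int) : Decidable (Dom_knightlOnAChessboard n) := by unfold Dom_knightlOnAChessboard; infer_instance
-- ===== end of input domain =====

-- B rewrites bfs as a level-synchronized BFS (a frontier per distance) instead of A's queue of
-- (i, j, distance) triples with O(queue) front insertions; the outer loop is unchanged (alternative).

-- 2-d read m[i][j] / write m[i][j] = v (indices are nonnegative and in range wherever used)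
def pvGet2 {α : Type} (m : List (List α)) (i j : Int) (d : α) : α :=
  PySem.List.pyGetD (PySem.List.pyGetD m i []) j d

def pvSet2 {α : Type} (m : List (List α)) (i j : Int) (v : α) : List (List α) :=
  PySem.List.pySetD m i (PySem.List.pySetD (PySem.List.pyGetD m i []) j v)

-- ===== PORT A =====
def pvMovesA (a b i j : Int) : List (Int × Int) :=
  [(i + a, j + b), (i + b, j + a), (i - a, j - b), (i - b, j - a),
   (i - a, j + b), (i - b, j + a), (i + a, j - b), (i + b, j - a)]

-- one enqueue-if-unvisited step of A's inner `for i_, j_ in valid_moves` loop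
def pvStepA (k : Int) (st : List (Int × Int × Int) × List (List Bool)) (t : Int × Int) :
    List (Int × Int × Int) × List (List Bool) :=
  if pvGet2 st.2 t.1 t.2 false = false then
    ((t.1, t.2, k + 1) :: st.1, pvSet2 st.2 t.1 t.2 true)
  else st

-- A's `while len(q)` loop; fuel-indexed (none = fuel ran out; the chosen fuel is proved sufficient)
def pvBfsAGo (n a b : Int) : Nat → List (Int × Int × Int) → List (List Bool) → Option Int
  | 0, _, _ => none
  | fuel + 1, q, visited =>
    match q.getLast? with
    | none => some (-1)
    | some (i, j, k) =>
      let q := q.dropLast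
      if i = n - 1 ∧ j = n - 1 then some k
      else
        let valid := (pvMovesA a b i j).filter
          (fun t => decide (0 ≤ t.1 ∧ t.1 < n ∧ 0 ≤ t.2 ∧ t.2 < n))
        let st := valid.foldl (pvStepA k) (q, visited)
        pvBfsAGo n a b fuel st.1 st.2

def pvBfsA (a b n : Int) : Int :=
  (pvBfsAGo n a b (n.toNat * n.toNat + 2) [(0, 0, 0)]
    (List.replicate n.toNat (List.replicate n.toNat false))).getD (-1)

def knightlOnAChessboard (n : Int) : List (List Int) :=
  let cost : List (List Int) :=
    List.replicate (n - 1).toNat (List.replicate (n - 1).toNat (-1))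
  let cost := pvSet2 cost (n - 2) (n - 2) 1
  (PySem.List.pyRange 0 (n - 1) 1).foldl (fun cost i =>
    (PySem.List.pyRange i (n - 1) 1).foldl (fun cost j =>
      if i < PySem.Int.floordiv n 2 ∨ j < PySem.Int.floordiv n 2 then
        let cost := pvSet2 cost i j (pvBfsA (i + 1) (j + 1) n)
        pvSet2 cost j i (pvGet2 cost i j 0)
      else cost) cost) cost

-- ===== PORT B =====
-- B's inner `for t in (...8 moves...)` loop body
def pvStepBMove (n : Int) (st : List (Int × Int) × PySem.Set (Int × Int)) (t : Int × Int) :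
    List (Int × Int) × PySem.Set (Int × Int) :=
  if (0 ≤ t.1 ∧ t.1 < n ∧ 0 ≤ t.2 ∧ t.2 < n) ∧ t ∉ st.2 then
    (st.1 ++ [t], PySem.Set.add st.2 t)
  else st

-- B's `for i, j in frontier` loop body: expand one frontier cell (the 8 moves inline, as in Source B)
def pvStepB (n a b : Int) (st : List (Int × Int) × PySem.Set (Int × Int)) (c : Int × Int) :
    List (Int × Int) × PySem.Set (Int × Int) :=
  [(c.1 + a, c.2 + b), (c.1 + b, c.2 + a), (c.1 - a, c.2 - b), (c.1 - b, c.2 - a),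
   (c.1 - a, c.2 + b), (c.1 - b, c.2 + a), (c.1 + a, c.2 - b), (c.1 + b, c.2 - a)].foldl
    (pvStepBMove n) st

-- B's `while frontier` loop; fuel-indexed (none = fuel ran out; the chosen fuel is proved sufficient)
def pvBfsBGo (n a b : Int) : Nat → List (Int × Int) → PySem.Set (Int × Int) → Int → Option Int
  | 0, _, _, _ => none
  | fuel + 1, frontier, visited, level =>
    if frontier = [] then some (-1)
    else if (n - 1, n - 1) ∈ frontier then some level
    else
      let st := frontier.foldl (pvStepB n a b) ([], visited)
      pvBfsBGo n a b fuel st.1 st.2 (level + 1)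

def pvBfsB (a b n : Int) : Int :=
  (pvBfsBGo n a b (n.toNat * n.toNat + 2) [(0, 0)] PySem.Set.empty 0).getD (-1)

def knightlOnAChessboard_alt (n : Int) : List (List Int) :=
  let cost : List (List Int) :=
    List.replicate (n - 1).toNat (List.replicate (n - 1).toNat (-1))
  let cost := pvSet2 cost (n - 2) (n - 2) 1
  (PySem.List.pyRange 0 (n - 1) 1).foldl (fun cost i =>
    (PySem.List.pyRange i (n - 1) 1).foldl (fun cost j =>
      if i < PySem.Int.floordiv n 2 ∨ j < PySem.Int.floordiv n 2 then
        let cost := pvSet2 cost i j (pvBfsB (i + 1) (j + 1) n)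
        pvSet2 cost j i (pvGet2 cost i j 0)
      else cost) cost) cost

-- ===== PRECONDITION & SPEC =====
-- Pre_: for n < 2 the Python A raises IndexError at `cost[n-2][n-2] = 1` (cost is empty)
def Pre_knightlOnAChessboard (n : Int) : Prop := 2 ≤ n
instance (n : Int) : Decidable (Pre_knightlOnAChessboard n) := by
  unfold Pre_knightlOnAChessboard; infer_instance
def pvWitness_knightlOnAChessboard : Int := 5

def Spec_knightlOnAChessboard (n : Int) (out : List (List Int)) : Prop := out = knightlOnAChessboard_alt n
instance (n : Int) (out : List (List Int)) : Decidable (Spec_knightlOnAChessboard n out) := by unfold Spec_knightlOnAChessboard; infer_instance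

-- ===== CLAIM (what is proved, stated in full; the proofs are below) =====
def Claim_equal_knightlOnAChessboard : Prop := ∀ (n : Int), Dom_knightlOnAChessboard n → Pre_knightlOnAChessboard n → Spec_knightlOnAChessboard n (knightlOnAChessboard n)

-- ===== LEMMAS AND PROOFS =====

-- abbreviations for the simulation proof
def pvTag (k : Int) (F : List (Int × Int)) : List (Int × Int × Int) :=
  F.map (fun c => (c.1, c.2, k))

def pvInG (n : Int) (c : Int × Int) : Prop := 0 ≤ c.1 ∧ c.1 < n ∧ 0 ≤ c.2 ∧ c.2 < n

-- A's bool matrix and B's set mark the same in-range cells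
def pvRel (n : Int) (vA : List (List Bool)) (vB : PySem.Set (Int × Int)) : Prop :=
  ∀ c : Int × Int, pvInG n c → (pvGet2 vA c.1 c.2 false = true ↔ c ∈ vB)

def pvShape (n : Int) (vA : List (List Bool)) : Prop :=
  vA.length = n.toNat ∧ ∀ r ∈ vA, r.length = n.toNat

def pvGrid (n : Int) : List (Int × Int) :=
  (PySem.List.pyRange 0 n 1).flatMap (fun i => (PySem.List.pyRange 0 n 1).map (fun j => (i, j)))

-- number of in-range cells not yet in the set
def pvRem (n : Int) (vB : PySem.Set (Int × Int)) : Nat :=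
  ((pvGrid n).filter (fun c => !vB.contains c)).length

lemma pvGet2_eq {α : Type} (m : List (List α)) (i j : Int) (d : α) (hi : 0 ≤ i) (hj : 0 ≤ j) :
    pvGet2 m i j d = (m.getD i.toNat []).getD j.toNat d := by
  rw [pvGet2, PySem.List.pyGetD_of_nonneg _ _ hi, PySem.List.pyGetD_of_nonneg _ _ hj]

lemma pvSet2_eq {α : Type} (m : List (List α)) (i j : Int) (v : α) (hi : 0 ≤ i) (hj : 0 ≤ j) :
    pvSet2 m i j v = m.set i.toNat ((m.getD i.toNat []).set j.toNat v) := by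
  rw [pvSet2, PySem.List.pySetD_of_nonneg _ _ hi, PySem.List.pySetD_of_nonneg _ _ hj,
      PySem.List.pyGetD_of_nonneg _ _ hi]

lemma pvRow_len (n : Int) (m : List (List Bool)) (i : Int) (hs : pvShape n m)
    (hi : 0 ≤ i) (hi' : i < n) : (m.getD i.toNat []).length = n.toNat := by
  apply hs.2
  rw [List.getD_eq_getElem _ _ (by have := hs.1; omega : i.toNat < m.length)]
  exact List.getElem_mem _

lemma pvShape_set2 (n : Int) (m : List (List Bool)) (i j : Int) (hs : pvShape n m)
    (hi : 0 ≤ i) (hi' : i < n) (hj : 0 ≤ j) (hj' : j < n) (v : Bool) :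
    pvShape n (pvSet2 m i j v) := by
  rw [pvSet2_eq m i j v hi hj]
  refine ⟨by simpa using hs.1, ?_⟩
  intro r hr
  rcases List.mem_or_eq_of_mem_set hr with h | h
  · exact hs.2 r h
  · subst h; rw [List.length_set]; exact pvRow_len n m i hs hi hi'

lemma pvGet2_set2_same (n : Int) (m : List (List Bool)) (i j : Int)
    (hs : pvShape n m) (hi : 0 ≤ i) (hi' : i < n) (hj : 0 ≤ j) (hj' : j < n) (v : Bool) :
    pvGet2 (pvSet2 m i j v) i j false = v := by
  have hrow := pvRow_len n m i hs hi hi'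
  rw [pvGet2_eq _ i j false hi hj, pvSet2_eq m i j v hi hj,
      List.getD_eq_getElem _ _ (by rw [List.length_set]; have := hs.1; omega : i.toNat < (m.set i.toNat ((m.getD i.toNat []).set j.toNat v)).length), List.getElem_set_self,
      List.getD_eq_getElem _ _ (by rw [List.length_set]; omega), List.getElem_set_self]

lemma pvGet2_set2_ne (n : Int) (m : List (List Bool)) (i j i' j' : Int)
    (hs : pvShape n m) (hi : 0 ≤ i) (hi' : i < n) (hj : 0 ≤ j) (hj' : j < n)
    (hI : 0 ≤ i') (hI' : i' < n) (hJ : 0 ≤ j') (hJ' : j' < n)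
    (h : ¬(i' = i ∧ j' = j)) (v : Bool) :
    pvGet2 (pvSet2 m i j v) i' j' false = pvGet2 m i' j' false := by
  have hrow := pvRow_len n m i hs hi hi'
  rw [pvGet2_eq _ i' j' false hI hJ, pvGet2_eq m i' j' false hI hJ,
      pvSet2_eq m i j v hi hj]
  by_cases hii : i'.toNat = i.toNat
  · have hij : j'.toNat ≠ j.toNat := by omega
    rw [hii, List.getD_eq_getElem _ _ (by simp; have := hs.1; omega : i.toNat < (m.set i.toNat _).length),
        List.getElem_set_self,
        List.getD_eq_getElem (l := (m.getD i.toNat []).set j.toNat v) _ (by rw [List.length_set]; omega),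
        List.getElem_set_ne (by omega),
        List.getD_eq_getElem (l := m.getD i.toNat []) _ (by omega)]
  · rw [List.getD_eq_getElem _ _ (by simp; have := hs.1; omega : i'.toNat < (m.set i.toNat _).length),
        List.getElem_set_ne (by omega),
        ← List.getD_eq_getElem m ([] : List Bool) (by have := hs.1; omega : i'.toNat < m.length)]


lemma mem_pvGrid (n : Int) (c : Int × Int) : c ∈ pvGrid n ↔ pvInG n c := by
  obtain ⟨i, j⟩ := c
  simp [pvGrid, pvInG, PySem.List.mem_pyRange_one, List.mem_flatMap]
  tauto

lemma length_pvGrid (n : Int) : (pvGrid n).length = n.toNat * n.toNat := by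
  simp [pvGrid, List.length_flatMap, Function.comp_def, PySem.List.length_pyRange_one,
        List.map_const', List.sum_replicate, smul_eq_mul]

lemma pvRem_le (n : Int) (vB : PySem.Set (Int × Int)) : pvRem n vB ≤ n.toNat * n.toNat := by
  calc pvRem n vB ≤ (pvGrid n).length := List.length_filter_le _ _
    _ = n.toNat * n.toNat := length_pvGrid n

lemma countP_split {α : Type} (l : List α) (p q : α → Bool) (h : ∀ x, p x = true → q x = true) :
    l.countP q = l.countP p + l.countP (fun x => q x && !p x) := by
  induction l with
  | nil => simp
  | cons a l ih =>
    by_cases hp : p a = true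
    · simp [List.countP_cons, hp, h a hp, ih]; omega
    · simp only [Bool.not_eq_true] at hp
      by_cases hq : q a = true <;> simp [List.countP_cons, hp, hq, ih] <;> omega

lemma pvRem_add_lt (n : Int) (vB : PySem.Set (Int × Int)) (c : Int × Int)
    (hg : pvInG n c) (hc : c ∉ vB) : pvRem n (vB ++ [c]) + 1 ≤ pvRem n vB := by
  simp only [pvRem, ← List.countP_eq_length_filter]
  rw [countP_split (pvGrid n) (fun x => !(vB ++ [c]).contains x) (fun x => !vB.contains x)
        (by intro x hx; simp at hx ⊢; tauto)]
  have hpos : 0 < (pvGrid n).countP (fun x => (!vB.contains x) && !(!(vB ++ [c]).contains x)) := by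
    rw [List.countP_pos_iff]
    exact ⟨c, (mem_pvGrid n c).2 hg, by simp [hc]⟩
  omega


-- fuel monotonicity
lemma pvBfsBGo_mono (n a b : Int) : ∀ (f f' : Nat) (F : List (Int × Int))
    (v : PySem.Set (Int × Int)) (k r : Int), f ≤ f' → pvBfsBGo n a b f F v k = some r →
    pvBfsBGo n a b f' F v k = some r := by
  intro f
  induction f with
  | zero => intro f' F v k r _ h; simp [pvBfsBGo] at h
  | succ f ih =>
    intro f' F v k r hle h
    obtain ⟨f'', rfl⟩ : ∃ f'', f' = f'' + 1 := ⟨f' - 1, by omega⟩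
    rw [pvBfsBGo] at h ⊢
    split_ifs at h ⊢ with h1 h2
    · exact h
    · exact h
    · exact ih f'' _ _ _ r (by omega) h

lemma pvTag_append (k : Int) (x y : List (Int × Int)) :
    pvTag k (x ++ y) = pvTag k x ++ pvTag k y := by simp [pvTag]

lemma pvCellStep (n : Int) (k : Int) :
    ∀ (m : List (Int × Int)) (q : List (Int × Int × Int)) (vA : List (List Bool))
      (nxt : List (Int × Int)) (vB : PySem.Set (Int × Int)),
      pvRel n vA vB → pvShape n vA →
      ∃ new : List (Int × Int),
        ((m.filter (fun t => decide (0 ≤ t.1 ∧ t.1 < n ∧ 0 ≤ t.2 ∧ t.2 < n))).foldl (pvStepA k) (q, vA)).1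
            = pvTag (k + 1) new.reverse ++ q ∧
        (m.foldl (pvStepBMove n) (nxt, vB)).1 = nxt ++ new ∧
        pvRel n ((m.filter (fun t => decide (0 ≤ t.1 ∧ t.1 < n ∧ 0 ≤ t.2 ∧ t.2 < n))).foldl (pvStepA k) (q, vA)).2
                (m.foldl (pvStepBMove n) (nxt, vB)).2 ∧
        pvShape n ((m.filter (fun t => decide (0 ≤ t.1 ∧ t.1 < n ∧ 0 ≤ t.2 ∧ t.2 < n))).foldl (pvStepA k) (q, vA)).2 ∧
        (∀ c ∈ new, pvInG n c) ∧
        pvRem n (m.foldl (pvStepBMove n) (nxt, vB)).2 + new.length ≤ pvRem n vB := by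
  intro m
  induction m with
  | nil =>
    intro q vA nxt vB hrel hsh
    exact ⟨[], by simp [pvTag], by simp, by simpa using hrel, by simpa using hsh, by simp, by simp⟩
  | cons t m ih =>
    intro q vA nxt vB hrel hsh
    by_cases hg : pvInG n t
    · by_cases hm : t ∈ vB
      · -- already visited: both sides skip t
        have hget : pvGet2 vA t.1 t.2 false = true := (hrel t hg).2 hm
        have hA : (t :: m).filter (fun t => decide (0 ≤ t.1 ∧ t.1 < n ∧ 0 ≤ t.2 ∧ t.2 < n))
            = t :: m.filter (fun t => decide (0 ≤ t.1 ∧ t.1 < n ∧ 0 ≤ t.2 ∧ t.2 < n)) := by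
          simp [List.filter_cons, pvInG] at hg ⊢; tauto
        rw [hA, List.foldl_cons, List.foldl_cons]
        have hstA : pvStepA k (q, vA) t = (q, vA) := by simp [pvStepA, hget]
        have hstB : pvStepBMove n (nxt, vB) t = (nxt, vB) := by
          simp only [pvStepBMove]; rw [if_neg (by simp; intro _ _ _ _; exact hm)]
        rw [hstA, hstB]
        exact ih q vA nxt vB hrel hsh
      · -- new cell: both sides record t
        have hget : pvGet2 vA t.1 t.2 false = false := by
          have := (hrel t hg).1; by_cases h : pvGet2 vA t.1 t.2 false = true
          · exact absurd (this h) hm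
          · simpa using h
        have hA : (t :: m).filter (fun t => decide (0 ≤ t.1 ∧ t.1 < n ∧ 0 ≤ t.2 ∧ t.2 < n))
            = t :: m.filter (fun t => decide (0 ≤ t.1 ∧ t.1 < n ∧ 0 ≤ t.2 ∧ t.2 < n)) := by
          simp [List.filter_cons, pvInG] at hg ⊢; tauto
        rw [hA, List.foldl_cons, List.foldl_cons]
        have hstA : pvStepA k (q, vA) t = ((t.1, t.2, k + 1) :: q, pvSet2 vA t.1 t.2 true) := by
          simp [pvStepA, hget]
        have hstB : pvStepBMove n (nxt, vB) t = (nxt ++ [t], vB ++ [t]) := by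
          simp only [pvStepBMove]
          rw [if_pos ⟨hg, hm⟩, PySem.Set.add_of_not_mem hm]
        rw [hstA, hstB]
        obtain ⟨hg1, hg2, hg3, hg4⟩ := hg
        have hsh' : pvShape n (pvSet2 vA t.1 t.2 true) :=
          pvShape_set2 n vA t.1 t.2 hsh hg1 hg2 hg3 hg4 true
        have hrel' : pvRel n (pvSet2 vA t.1 t.2 true) (vB ++ [t]) := by
          intro c hc
          by_cases hct : c = t
          · subst hct
            rw [pvGet2_set2_same n vA c.1 c.2 hsh hg1 hg2 hg3 hg4]
            simp
          · obtain ⟨hc1, hc2, hc3, hc4⟩ := hc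
            rw [pvGet2_set2_ne n vA t.1 t.2 c.1 c.2 hsh hg1 hg2 hg3 hg4 hc1 hc2 hc3 hc4
                (by intro ⟨h1, h2⟩; exact hct (Prod.ext h1 h2)) true]
            rw [hrel c ⟨hc1, hc2, hc3, hc4⟩]
            simp [hct]
        obtain ⟨new, ha1, hb1, hrel2, hsh2, hgnew, hrem⟩ :=
          ih ((t.1, t.2, k + 1) :: q) (pvSet2 vA t.1 t.2 true) (nxt ++ [t]) (vB ++ [t]) hrel' hsh'
        refine ⟨t :: new, ?_, ?_, hrel2, hsh2, ?_, ?_⟩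
        · rw [ha1]; simp [pvTag_append, pvTag]
        · rw [hb1]; simp
        · intro c hc
          rcases List.mem_cons.1 hc with h | h
          · subst h; exact ⟨hg1, hg2, hg3, hg4⟩
          · exact hgnew c h
        · have := pvRem_add_lt n vB t ⟨hg1, hg2, hg3, hg4⟩ hm
          simp only [List.length_cons]
          omega
    · -- out of range: A's filter and B's guard both drop t
      have hA : (t :: m).filter (fun t => decide (0 ≤ t.1 ∧ t.1 < n ∧ 0 ≤ t.2 ∧ t.2 < n))
          = m.filter (fun t => decide (0 ≤ t.1 ∧ t.1 < n ∧ 0 ≤ t.2 ∧ t.2 < n)) := by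
        simp only [List.filter_cons]; rw [if_neg (by simpa [pvInG] using hg)]
      have hstB : pvStepBMove n (nxt, vB) t = (nxt, vB) := by
        simp only [pvStepBMove]
        rw [if_neg (by simp [pvInG] at hg ⊢; intro h1 h2 h3 h4; have := hg h1 h2 h3; omega)]
      rw [hA, List.foldl_cons, hstB]
      exact ih q vA nxt vB hrel hsh

-- processing one frontier: |F| pops of A simulate B's level fold
lemma pvProcF (n a b k : Int) :
    ∀ (F : List (Int × Int)) (nxt : List (Int × Int)) (vA : List (List Bool))
      (vB : PySem.Set (Int × Int)) (fA : Nat),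
      pvRel n vA vB → pvShape n vA → (∀ c ∈ F, pvInG n c) → (∀ c ∈ nxt, pvInG n c) →
      (if (n - 1, n - 1) ∈ F then
        pvBfsAGo n a b (fA + F.length) (pvTag (k + 1) nxt.reverse ++ (pvTag k F).reverse) vA = some k
       else
        ∃ vA' : List (List Bool),
          pvRel n vA' (F.foldl (pvStepB n a b) (nxt, vB)).2 ∧ pvShape n vA' ∧
          (∀ c ∈ (F.foldl (pvStepB n a b) (nxt, vB)).1, pvInG n c) ∧
          pvRem n (F.foldl (pvStepB n a b) (nxt, vB)).2 + (F.foldl (pvStepB n a b) (nxt, vB)).1.length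
            ≤ pvRem n vB + nxt.length ∧
          pvBfsAGo n a b (fA + F.length) (pvTag (k + 1) nxt.reverse ++ (pvTag k F).reverse) vA
            = pvBfsAGo n a b fA (pvTag (k + 1) (F.foldl (pvStepB n a b) (nxt, vB)).1.reverse) vA') := by
  intro F
  induction F with
  | nil =>
    intro nxt vA vB fA hrel hsh _ hnxt
    rw [if_neg (by simp)]
    exact ⟨vA, by simpa using hrel, hsh, by simpa using hnxt, by simp,
      by simp [pvTag]⟩
  | cons c F ih =>
    intro nxt vA vB fA hrel hsh hF hnxt
    have hq : pvTag (k + 1) nxt.reverse ++ (pvTag k (c :: F)).reverse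
        = (pvTag (k + 1) nxt.reverse ++ (pvTag k F).reverse) ++ [(c.1, c.2, k)] := by
      simp [pvTag]
    have hfe : fA + (c :: F).length = (fA + F.length) + 1 := by simp; omega
    -- unfold one step of A
    have hstep : pvBfsAGo n a b (fA + (c :: F).length)
        (pvTag (k + 1) nxt.reverse ++ (pvTag k (c :: F)).reverse) vA
        = (if c.1 = n - 1 ∧ c.2 = n - 1 then some k
           else
            let valid := (pvMovesA a b c.1 c.2).filter
              (fun t => decide (0 ≤ t.1 ∧ t.1 < n ∧ 0 ≤ t.2 ∧ t.2 < n))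
            let st := valid.foldl (pvStepA k)
              (pvTag (k + 1) nxt.reverse ++ (pvTag k F).reverse, vA)
            pvBfsAGo n a b (fA + F.length) st.1 st.2) := by
      rw [hq, hfe, pvBfsAGo]
      simp only [List.getLast?_concat, List.dropLast_concat]
    by_cases hc : c.1 = n - 1 ∧ c.2 = n - 1
    · have hmem : (n - 1, n - 1) ∈ c :: F := by
        obtain ⟨h1, h2⟩ := hc
        have hce : c = (n - 1, n - 1) := Prod.ext h1 h2
        rw [← hce]; exact List.mem_cons_self ..
      rw [if_pos hmem, hstep, if_pos hc]
    · -- expand c via pvCellStep, then use the induction hypothesis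
      obtain ⟨new, ha1, hb1, hrel1, hsh1, hgnew, hrem1⟩ :=
        pvCellStep n k (pvMovesA a b c.1 c.2)
          (pvTag (k + 1) nxt.reverse ++ (pvTag k F).reverse) vA nxt vB hrel hsh
      set stB := (pvMovesA a b c.1 c.2).foldl (pvStepBMove n) (nxt, vB) with hstBdef
      set stA := ((pvMovesA a b c.1 c.2).filter
            (fun t => decide (0 ≤ t.1 ∧ t.1 < n ∧ 0 ≤ t.2 ∧ t.2 < n))).foldl (pvStepA k)
            (pvTag (k + 1) nxt.reverse ++ (pvTag k F).reverse, vA) with hstAdef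
      have hBfold : (c :: F).foldl (pvStepB n a b) (nxt, vB)
          = F.foldl (pvStepB n a b) stB := by
        rw [List.foldl_cons, hstBdef]; rfl
      have hq1 : stA.1 = pvTag (k + 1) stB.1.reverse ++ (pvTag k F).reverse := by
        rw [ha1, hb1]
        simp [pvTag_append, List.reverse_append]
      have hnxt1 : ∀ x ∈ stB.1, pvInG n x := by
        rw [hb1]; intro x hx
        rcases List.mem_append.1 hx with h | h
        · exact hnxt x h
        · exact hgnew x h
      have ihs := ih stB.1 stA.2 stB.2 fA hrel1 hsh1
          (fun x hx => hF x (List.mem_cons_of_mem c hx)) hnxt1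
      simp only [Prod.mk.eta] at ihs
      by_cases hmem : (n - 1, n - 1) ∈ c :: F
      · have hmemF : (n - 1, n - 1) ∈ F := by
          rcases List.mem_cons.1 hmem with h | h
          · exact absurd ⟨congrArg Prod.fst h.symm, congrArg Prod.snd h.symm⟩ hc
          · exact h
        rw [if_pos hmem, hstep, if_neg hc]
        simp only []
        rw [← hstAdef, hq1]
        rw [if_pos hmemF] at ihs
        exact ihs
      · have hmemF : (n - 1, n - 1) ∉ F := fun h => hmem (List.mem_cons_of_mem c h)
        rw [if_neg hmem]
        rw [if_neg hmemF] at ihs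
        obtain ⟨vA', hr, hs2, hg2, hrem2, heq⟩ := ihs
        refine ⟨vA', ?_, hs2, ?_, ?_, ?_⟩
        · rw [hBfold]; exact hr
        · rw [hBfold]; exact hg2
        · rw [hBfold]
          have hlen : stB.1.length = nxt.length + new.length := by
            rw [hb1]; simp
          omega
        · rw [hstep, if_neg hc]
          simp only []
          rw [← hstAdef, hq1, hBfold]
          exact heq

-- the level simulation: A's queue BFS equals B's frontier BFS, with explicit fuel accounting
lemma pvTag_reverse (k : Int) (xs : List (Int × Int)) :
    pvTag k xs.reverse = (pvTag k xs).reverse := by simp [pvTag]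

lemma pvLevel (n a b : Int) :
    ∀ (U : Nat) (F : List (Int × Int)) (vA : List (List Bool)) (vB : PySem.Set (Int × Int)) (k : Int),
      pvRem n vB ≤ U → pvRel n vA vB → pvShape n vA → (∀ c ∈ F, pvInG n c) →
      ∃ r : Int, pvBfsAGo n a b (F.length + U + 1) (pvTag k F).reverse vA = some r ∧
                 pvBfsBGo n a b (U + 2) F vB k = some r := by
  intro U
  induction U using Nat.strong_induction_on with
  | _ U ih =>
  intro F vA vB k hU hrel hsh hF
  by_cases hFne : F = []
  · subst hFne
    refine ⟨-1, ?_, ?_⟩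
    · have h1 : ([] : List (Int × Int)).length + U + 1 = U + 1 := by simp
      rw [h1, pvBfsAGo]; simp [pvTag]
    · rw [pvBfsBGo]; simp
  · have hproc := pvProcF n a b k F [] vA vB (U + 1) hrel hsh hF (by simp)
    have hqe : pvTag (k + 1) ([] : List (Int × Int)).reverse ++ (pvTag k F).reverse
        = (pvTag k F).reverse := by simp [pvTag]
    rw [hqe] at hproc
    have hfu : (U + 1) + F.length = F.length + U + 1 := by omega
    rw [hfu] at hproc
    by_cases hmem : (n - 1, n - 1) ∈ F
    · rw [if_pos hmem] at hproc
      refine ⟨k, hproc, ?_⟩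
      have h2 : U + 2 = (U + 1) + 1 := by omega
      rw [h2, pvBfsBGo, if_neg hFne, if_pos hmem]
    · rw [if_neg hmem] at hproc
      obtain ⟨vA', hrel', hsh', hg', hrem', heq⟩ := hproc
      set S := F.foldl (pvStepB n a b) ([], vB) with hSdef
      have hrem2 : pvRem n S.2 + S.1.length ≤ pvRem n vB := by simpa using hrem'
      have hBstep : pvBfsBGo n a b (U + 2) F vB k
          = pvBfsBGo n a b (U + 1) S.1 S.2 (k + 1) := by
        have h2 : U + 2 = (U + 1) + 1 := by omega
        rw [h2, pvBfsBGo, if_neg hFne, if_neg hmem]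
      by_cases hS1 : S.1 = []
      · refine ⟨-1, ?_, ?_⟩
        · rw [heq, hS1, pvBfsAGo]; simp [pvTag]
        · rw [hBstep, hS1, pvBfsBGo]; simp
      · have hm1 : 0 < S.1.length := List.length_pos_iff.2 hS1
        have hmU : S.1.length ≤ U := by omega
        have hU' : pvRem n S.2 ≤ U - S.1.length := by omega
        obtain ⟨r, hA2, hB2⟩ := ih (U - S.1.length) (by omega) S.1 vA' S.2 (k + 1)
          hU' hrel' hsh' hg'
        refine ⟨r, ?_, ?_⟩
        · rw [heq, pvTag_reverse]
          have hfu2 : S.1.length + (U - S.1.length) + 1 = U + 1 := by omega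
          rw [hfu2] at hA2
          exact hA2
        · rw [hBstep]
          exact pvBfsBGo_mono n a b _ _ _ _ _ _ (by omega) hB2

lemma pvBfs_eq (a b n : Int) (hn : 2 ≤ n) : pvBfsA a b n = pvBfsB a b n := by
  have hsh : pvShape n (List.replicate n.toNat (List.replicate n.toNat false)) := by
    constructor
    · simp
    · intro r hr
      rw [List.eq_of_mem_replicate hr]
      simp
  have hrel : pvRel n (List.replicate n.toNat (List.replicate n.toNat false)) [] := by
    intro c hc
    obtain ⟨h1, h2, h3, h4⟩ := hc
    rw [pvGet2_eq _ _ _ _ h1 h3]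
    rw [List.getD_eq_getElem (List.replicate n.toNat (List.replicate n.toNat false)) []
          (by simp; omega), List.getElem_replicate,
        List.getD_eq_getElem _ false (by simp; omega), List.getElem_replicate]
    simp
  obtain ⟨r, hA, hB⟩ := pvLevel n a b (n.toNat * n.toNat) [(0, 0)]
    (List.replicate n.toNat (List.replicate n.toNat false)) PySem.Set.empty 0
    (by simpa using pvRem_le n PySem.Set.empty) hrel hsh
    (by intro c hc; simp at hc; subst hc; exact ⟨le_refl 0, by omega, le_refl 0, by omega⟩)
  have hfu : ([(0, 0)] : List (Int × Int)).length + n.toNat * n.toNat + 1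
      = n.toNat * n.toNat + 2 := by simp only [List.length_cons, List.length_nil]; omega
  rw [hfu] at hA
  have hq0 : (pvTag 0 [(0, 0)]).reverse = [((0 : Int), (0 : Int), (0 : Int))] := rfl
  rw [hq0] at hA
  rw [pvBfsA, pvBfsB, hA, hB]

lemma pvKnightl_eq (n : Int) (hn : 2 ≤ n) :
    knightlOnAChessboard n = knightlOnAChessboard_alt n := by
  unfold knightlOnAChessboard knightlOnAChessboard_alt
  simp only [pvBfs_eq _ _ n hn]

-- ===== VERDICT (by name: the statement is the Claim_ definition above) =====
theorem knightlOnAChessboard_spec : Claim_equal_knightlOnAChessboard := by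
  intro n _ hpre
  unfold Spec_knightlOnAChessboard
  exact pvKnightl_eq n hpre
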